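-- pv_equiv track=rewrite | github.com/johannespaju/2024-fall-python | EX/ex08_recursion/recursion.py | x_sum_recursion
-- ===== SOURCE A (Python) =====
-- def x_sum_recursion(nums: list, x: int) -> int:
--     """
--     Given list 'nums' and a number called 'x' recursively return sum of every x'th number in 'nums'.
--
--     In this task "indexing" starts from 1, so if 'x' = 2 and 'nums' = [2, 3, 4, -9], the output should be -6 (3 + -9).
--     'X' can also be negative, in that case indexing starts from the end of 'nums', see examples below.
--     If 'x' is 0, the sum should be 0 as well.
--
--     Solution must be recursive!
--
--     :param nums: list of integers
--     :param x: number indicating every which num to add to sum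
--     :return: sum of every x'th number in the list
--     """
--     if x == 0:
--         return 0
--
--     if x > 0:
--         if len(nums) >= x:
--             return nums[x - 1] + x_sum_recursion(nums[x:], x)
--         else:
--             return 0
--
--     if x < 0:
--         if len(nums) >= abs(x):  # abs() -> absoluutvaartus
--             return nums[x] + x_sum_recursion(nums[:x], x)
--         else:
--             return 0
-- ===== SOURCE B (Python) =====
-- def x_sum_recursion(nums: list, x: int) -> int:
--     """Iterative re-implementation: explicit index + running sum instead of slice-and-recurse."""
--     total = 0
--     if x > 0:
--         i = x - 1
--         while i < len(nums):
--             total += nums[i]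
--             i += x
--     elif x < 0:
--         i = x
--         while -i <= len(nums):
--             total += nums[i]
--             i += x
--     return total
-- ===== Notes on version B (the rewrite author's own statement) =====
-- stated objective: alternative
-- what changed: Replaces the slice-and-recurse scheme (which copies a shrinking list at every step) with a single iterative loop over an explicit stepping index and a running accumulator.
import Mathlib
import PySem

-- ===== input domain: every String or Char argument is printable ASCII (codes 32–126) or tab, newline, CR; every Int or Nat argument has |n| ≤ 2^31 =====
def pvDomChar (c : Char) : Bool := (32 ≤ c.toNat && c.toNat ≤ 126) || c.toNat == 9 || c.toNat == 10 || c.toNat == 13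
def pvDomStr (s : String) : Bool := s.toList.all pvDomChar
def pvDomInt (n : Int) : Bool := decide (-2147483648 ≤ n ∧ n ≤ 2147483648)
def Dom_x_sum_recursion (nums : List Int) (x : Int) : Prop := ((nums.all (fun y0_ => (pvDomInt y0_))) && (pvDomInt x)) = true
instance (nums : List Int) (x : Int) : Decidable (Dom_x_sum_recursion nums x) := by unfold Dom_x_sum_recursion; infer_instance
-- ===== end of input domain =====

-- B replaces A's slice-and-recurse scheme by one iterative index+accumulator loop; proved to return the same value on all inputs.

-- ===== PORT A =====
-- Literal port of A: recursion on a slice. nums[x-1] / nums[x] are always in range on the branch taken, so pyGetD's default is never used.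
def x_sum_recursion (nums : List Int) (x : Int) : Int :=
  if x = 0 then 0
  else if hpos : x > 0 then
    if h : (nums.length : Int) ≥ x then
      PySem.List.pyGetD nums (x - 1) 0 + x_sum_recursion (PySem.List.slice nums (some x) none) x
    else 0
  else
    if h : (nums.length : Int) ≥ |x| then
      PySem.List.pyGetD nums x 0 + x_sum_recursion (PySem.List.slice nums none (some x)) x
    else 0
termination_by nums.length
decreasing_by
  · rw [PySem.List.slice_from nums (a := x) (by omega)]
    simp only [List.length_drop]
    omega
  · rw [abs_of_neg (by omega : x < 0)] at h
    have hk : x = -(((-x).toNat : Nat) : Int) := by omega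
    rw [hk, PySem.List.slice_to_neg_natCast nums (-x).toNat (by omega)]
    simp only [List.length_take]
    omega

-- ===== PORT B =====
-- B's while-loop for x > 0: explicit index i and running total; hx is the loop's termination witness.
def xsumLoopPos (nums : List Int) (x : Int) (hx : 0 < x) (i : Int) (total : Int) : Int :=
  if i < (nums.length : Int) then
    xsumLoopPos nums x hx (i + x) (total + PySem.List.pyGetD nums i 0)
  else total
termination_by (nums.length - i).toNat
decreasing_by omega

-- B's while-loop for x < 0 (Python negative indexing via pyGetD).
def xsumLoopNeg (nums : List Int) (x : Int) (hx : x < 0) (i : Int) (total : Int) : Int :=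
  if -i ≤ (nums.length : Int) then
    xsumLoopNeg nums x hx (i + x) (total + PySem.List.pyGetD nums i 0)
  else total
termination_by (nums.length + i + 1).toNat
decreasing_by omega

def x_sum_recursion_alt (nums : List Int) (x : Int) : Int :=
  if hx : x > 0 then xsumLoopPos nums x hx (x - 1) 0
  else if hx' : x < 0 then xsumLoopNeg nums x hx' x 0
  else 0

-- ===== PRECONDITION & SPEC =====
def Spec_x_sum_recursion (nums : List Int) (x : Int) (out : Int) : Prop := out = x_sum_recursion_alt nums x
instance (nums : List Int) (x : Int) (out : Int) : Decidable (Spec_x_sum_recursion nums x out) := by unfold Spec_x_sum_recursion; infer_instance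

-- ===== CLAIM (what is proved, stated in full; the proofs are below) =====
def Claim_equal_x_sum_recursion : Prop := ∀ (nums : List Int) (x : Int), Dom_x_sum_recursion nums x → Spec_x_sum_recursion nums x (x_sum_recursion nums x)

-- ===== LEMMAS AND PROOFS =====

-- the accumulator factors out of the positive loop
theorem xsumLoopPos_acc (n : Nat) : ∀ (nums : List Int) (x : Int) (hx : 0 < x) (i t : Int),
    (nums.length - i).toNat = n →
    xsumLoopPos nums x hx i t = t + xsumLoopPos nums x hx i 0 := by
  induction n using Nat.strong_induction_on with
  | _ n ih =>
    intro nums x hx i t hn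
    conv_lhs => rw [xsumLoopPos]
    conv_rhs => rw [xsumLoopPos]
    split
    · rw [ih ((nums.length - (i + x)).toNat) (by omega) nums x hx (i + x) _ rfl,
          ih ((nums.length - (i + x)).toNat) (by omega) nums x hx (i + x) (0 + PySem.List.pyGetD nums i 0) rfl]
      ring
    · simp

-- the accumulator factors out of the negative loop
theorem xsumLoopNeg_acc (n : Nat) : ∀ (nums : List Int) (x : Int) (hx : x < 0) (i t : Int),
    (nums.length + i + 1).toNat = n →
    xsumLoopNeg nums x hx i t = t + xsumLoopNeg nums x hx i 0 := by
  induction n using Nat.strong_induction_on with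
  | _ n ih =>
    intro nums x hx i t hn
    conv_lhs => rw [xsumLoopNeg]
    conv_rhs => rw [xsumLoopNeg]
    split
    · rw [ih ((nums.length + (i + x) + 1).toNat) (by omega) nums x hx (i + x) _ rfl,
          ih ((nums.length + (i + x) + 1).toNat) (by omega) nums x hx (i + x) (0 + PySem.List.pyGetD nums i 0) rfl]
      ring
    · simp

-- running the positive loop on nums[x:] from i = running it on nums from i + x
theorem xsumLoopPos_shift (n : Nat) : ∀ (nums : List Int) (x : Int) (hx : 0 < x) (i : Int),
    0 ≤ i → (nums.length - i).toNat = n →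
    xsumLoopPos (nums.drop x.toNat) x hx i 0 = xsumLoopPos nums x hx (i + x) 0 := by
  induction n using Nat.strong_induction_on with
  | _ n ih =>
    intro nums x hx i hi hn
    conv_lhs => rw [xsumLoopPos]
    conv_rhs => rw [xsumLoopPos]
    have hlen : ((nums.drop x.toNat).length : Int) = (nums.length : Int) - (min x.toNat nums.length : Nat) := by
      simp [List.length_drop]; omega
    by_cases hc : i + x < (nums.length : Int)
    · have hc' : i < ((nums.drop x.toNat).length : Int) := by simp [List.length_drop]; omega
      rw [if_pos hc', if_pos hc]
      have hel : PySem.List.pyGetD (nums.drop x.toNat) i 0 = PySem.List.pyGetD nums (i + x) 0 := by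
        rw [PySem.List.pyGetD_eq_getElem (nums.drop x.toNat) 0 hi hc',
            PySem.List.pyGetD_eq_getElem nums 0 (by omega) hc,
            List.getElem_drop]
        congr 1
        omega
      rw [hel,
          xsumLoopPos_acc ((nums.drop x.toNat).length - (i + x)).toNat (nums.drop x.toNat) x hx (i + x) _ rfl,
          xsumLoopPos_acc (nums.length - (i + x + x)).toNat nums x hx (i + x + x) _ rfl,
          ih ((nums.length - (i + x)).toNat) (by omega) nums x hx (i + x) (by omega) rfl]
    · have hc' : ¬ i < ((nums.drop x.toNat).length : Int) := by simp [List.length_drop]; omega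
      rw [if_neg hc', if_neg hc]

-- running the negative loop on nums[:x] from i = running it on nums from i + x
theorem xsumLoopNeg_shift (n : Nat) : ∀ (nums : List Int) (x : Int) (hx : x < 0) (i : Int),
    i < 0 → 0 ≤ (nums.length : Int) + x → (nums.length + i + 1).toNat = n →
    xsumLoopNeg (nums.take ((nums.length : Int) + x).toNat) x hx i 0 = xsumLoopNeg nums x hx (i + x) 0 := by
  induction n using Nat.strong_induction_on with
  | _ n ih =>
    intro nums x hx i hi hlx hn
    set m : Nat := ((nums.length : Int) + x).toNat with hm
    have hmlen : (nums.take m).length = m := by simp [List.length_take]; omega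
    conv_lhs => rw [xsumLoopNeg]
    conv_rhs => rw [xsumLoopNeg]
    by_cases hc : -(i + x) ≤ (nums.length : Int)
    · have hc' : -i ≤ ((nums.take m).length : Int) := by rw [hmlen]; omega
      rw [if_pos hc', if_pos hc]
      have hel : PySem.List.pyGetD (nums.take m) i 0 = PySem.List.pyGetD nums (i + x) 0 := by
        have h1 : i = -(((-i).toNat : Nat) : Int) := by omega
        have h2 : i + x = -((((-(i + x)).toNat : Nat)) : Int) := by omega
        have e1 : PySem.List.pyGetD (nums.take m) i 0
            = (nums.take m)[(nums.take m).length - (-i).toNat]'(by rw [hmlen]; omega) := by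
          conv_lhs => rw [h1]
          exact PySem.List.pyGetD_neg_natCast _ _ _ (by omega) (by rw [hmlen]; omega)
        have e2 : PySem.List.pyGetD nums (i + x) 0
            = nums[nums.length - (-(i + x)).toNat]'(by omega) := by
          conv_lhs => rw [h2]
          exact PySem.List.pyGetD_neg_natCast _ _ _ (by omega) (by omega)
        rw [e1, e2, List.getElem_take]
        congr 1
        rw [hmlen]
        omega
      rw [hel,
          xsumLoopNeg_acc ((nums.take m).length + (i + x) + 1).toNat (nums.take m) x hx (i + x) _ rfl,
          xsumLoopNeg_acc (nums.length + (i + x + x) + 1).toNat nums x hx (i + x + x) _ rfl,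
          ih ((nums.length + (i + x) + 1).toNat) (by omega) nums x hx (i + x) (by omega) (by omega) rfl]
    · have hc' : ¬ -i ≤ ((nums.take m).length : Int) := by rw [hmlen]; omega
      rw [if_neg hc', if_neg hc]

-- A equals B's positive loop started at x - 1
theorem A_eq_loopPos (n : Nat) : ∀ (nums : List Int) (x : Int) (hx : 0 < x),
    nums.length = n → x_sum_recursion nums x = xsumLoopPos nums x hx (x - 1) 0 := by
  induction n using Nat.strong_induction_on with
  | _ n ih =>
    intro nums x hx hn
    conv_lhs => rw [x_sum_recursion]
    conv_rhs => rw [xsumLoopPos]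
    rw [if_neg (by omega : ¬ x = 0), dif_pos hx]
    by_cases h : (nums.length : Int) ≥ x
    · rw [dif_pos h, if_pos (by omega : x - 1 < (nums.length : Int))]
      rw [PySem.List.slice_from nums (a := x) (by omega)]
      rw [ih (nums.drop x.toNat).length (by simp [List.length_drop]; omega) _ x hx rfl]
      rw [xsumLoopPos_shift (nums.length - (x - 1)).toNat nums x hx (x - 1) (by omega) rfl]
      rw [xsumLoopPos_acc (nums.length - (x - 1 + x)).toNat nums x hx (x - 1 + x)
            (0 + PySem.List.pyGetD nums (x - 1) 0) rfl]
      ring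
    · rw [dif_neg h, if_neg (by omega : ¬ x - 1 < (nums.length : Int))]

-- A equals B's negative loop started at x
theorem A_eq_loopNeg (n : Nat) : ∀ (nums : List Int) (x : Int) (hx : x < 0),
    nums.length = n → x_sum_recursion nums x = xsumLoopNeg nums x hx x 0 := by
  induction n using Nat.strong_induction_on with
  | _ n ih =>
    intro nums x hx hn
    conv_lhs => rw [x_sum_recursion]
    conv_rhs => rw [xsumLoopNeg]
    rw [if_neg (by omega : ¬ x = 0), dif_neg (by omega : ¬ x > 0)]
    by_cases h : (nums.length : Int) ≥ |x|
    · rw [dif_pos h, if_pos (by rw [abs_of_neg hx] at h; omega : -x ≤ (nums.length : Int))]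
      have hx' : x = -(((-x).toNat : Nat) : Int) := by omega
      have hslice : PySem.List.slice nums none (some x) = nums.take ((nums.length : Int) + x).toNat := by
        rw [hx', PySem.List.slice_to_neg_natCast nums (-x).toNat (by omega)]
        congr 1
        omega
      rw [hslice]
      rw [ih (nums.take ((nums.length : Int) + x).toNat).length
            (by simp [List.length_take]; rw [abs_of_neg hx] at h; omega) _ x hx rfl]
      rw [xsumLoopNeg_shift (nums.length + x + 1).toNat nums x hx x (by omega)
            (by rw [abs_of_neg hx] at h; omega) rfl]
      rw [xsumLoopNeg_acc (nums.length + (x + x) + 1).toNat nums x hx (x + x)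
            (0 + PySem.List.pyGetD nums x 0) rfl]
      ring
    · rw [dif_neg h, if_neg (by rw [abs_of_neg hx] at h; omega : ¬ -x ≤ (nums.length : Int))]

-- ===== VERDICT (by name: the statement is the Claim_ definition above) =====
theorem x_sum_recursion_spec : Claim_equal_x_sum_recursion := by
  intro nums x _
  unfold Spec_x_sum_recursion x_sum_recursion_alt
  by_cases hx : x > 0
  · rw [dif_pos hx]
    exact A_eq_loopPos nums.length nums x hx rfl
  · rw [dif_neg hx]
    by_cases hx' : x < 0
    · rw [dif_pos hx']
      exact A_eq_loopNeg nums.length nums x hx' rfl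
    · rw [dif_neg hx']
      have : x = 0 := by omega
      rw [x_sum_recursion, if_pos this]
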